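-- pv_equiv track=rewrite | github.com/helenper/AdventOfCode | AoC2020/AoC2020_Day06/day06.py | group_ans
-- ===== SOURCE A (Python) =====
-- def group_ans(str1):
--     ansPerGroup = {}
--     yesAns = 0
--     keyCounts = []
--
--
--     str_elm = str1.split(",")
--
--     for i in range(len(str_elm)):
--         ansPerGroup["Person"+str(i)] = {}
--         for letter in str_elm[i]:
--             if letter not in ansPerGroup["Person"+str(i)].keys():
--                 ansPerGroup["Person"+str(i)][letter] = str_elm.count(letter)
--             else:
--               continue
--
--     for i in range(len(ansPerGroup.keys())):
--             keys = ansPerGroup["Person"+str(i)].keys()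
--             for elm in keys:
--                 keyCounts.append(elm)
--
--     counter = {i:keyCounts.count(i) for i in keyCounts}
--
--     for elm in counter.keys():
--         if counter[elm] >= len(str_elm):
--             yesAns += 1
--         else:
--             continue
--
--     return yesAns
-- ===== SOURCE B (Python) =====
-- def group_ans(str1):
--     people = str1.split(",")
--     common = set(people[0])
--     for p in people[1:]:
--         common &= set(p)
--     return len(common)
-- ===== Notes on version B (the rewrite author's own statement) =====
-- stated objective: faster
-- what changed: Replaced the dict-of-dicts bookkeeping with repeated list.count scans by a single pass that intersects each person's set of letters, returning the size of the intersection.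
import Mathlib
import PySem

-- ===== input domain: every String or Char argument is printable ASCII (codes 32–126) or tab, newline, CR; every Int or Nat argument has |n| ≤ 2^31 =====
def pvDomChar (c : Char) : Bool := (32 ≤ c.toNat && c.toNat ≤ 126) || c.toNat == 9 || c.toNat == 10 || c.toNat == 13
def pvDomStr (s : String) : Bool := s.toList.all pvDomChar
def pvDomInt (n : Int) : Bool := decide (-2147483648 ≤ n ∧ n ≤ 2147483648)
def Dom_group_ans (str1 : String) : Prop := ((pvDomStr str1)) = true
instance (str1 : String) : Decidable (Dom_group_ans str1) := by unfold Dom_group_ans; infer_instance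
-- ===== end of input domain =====

-- B replaces A's dict-of-dicts bookkeeping (with repeated list.count scans) by one pass
-- intersecting each person's set of letters; equal results, a faster algorithm.

-- ===== PORT A =====
-- "Person" + str(i)
def paKey (i : Int) : String := "Person" ++ PySem.Int.toStr i

def group_ans (str1 : String) : Int :=
  -- str_elm = str1.split(",") ; sep "," is nonempty so split? is always `some`
  let strElm : List String := (PySem.Str.split? str1 ",").getD []
  -- first loop: build ansPerGroup
  let ansPerGroup : PySem.Dict String (PySem.Dict Char Int) :=
    (PySem.List.pyRange 0 (strElm.length : Int)).foldl (fun d i =>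
      let d := d.insert (paKey i) PySem.Dict.empty
      -- for letter in str_elm[i] (the index is always in range, so the getD "" arm is never taken)
      ((PySem.List.pyGet? strElm i).getD "").toList.foldl (fun d letter =>
        let cur := (d.get? (paKey i)).getD PySem.Dict.empty
        if cur.contains letter = false then
          d.insert (paKey i) (cur.insert letter ((PySem.List.count strElm (String.singleton letter) : Nat) : Int))
        else d) d) PySem.Dict.empty
  -- second loop: collect every person's keys
  let keyCounts : List Char :=
    (PySem.List.pyRange 0 (ansPerGroup.keys.length : Int)).foldl (fun ks i =>
      ((ansPerGroup.get? (paKey i)).getD PySem.Dict.empty).keys.foldl (fun ks elm => ks ++ [elm]) ks) []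
  -- counter = {i: keyCounts.count(i) for i in keyCounts}
  let counter : PySem.Dict Char Int :=
    keyCounts.foldl (fun c x => c.insert x ((PySem.List.count keyCounts x : Nat) : Int)) PySem.Dict.empty
  -- final loop over counter's keys
  counter.keys.foldl (fun y elm =>
    if (strElm.length : Int) ≤ counter.getD elm 0 then y + 1 else y) 0

-- ===== PORT B =====
def group_ans_alt (str1 : String) : Int :=
  match (PySem.Str.split? str1 ",").getD [] with
  | [] => 0   -- unreachable: split(",") always returns a nonempty list
  | p :: rest =>
    ((rest.foldl (fun acc q => PySem.Set.inter acc (PySem.Set.ofList q.toList))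
        (PySem.Set.ofList p.toList)).length : Int)

-- ===== PRECONDITION & SPEC =====
def Spec_group_ans (str1 : String) (out : Int) : Prop := out = group_ans_alt str1
instance (str1 : String) (out : Int) : Decidable (Spec_group_ans str1 out) := by unfold Spec_group_ans; infer_instance

-- ===== CLAIM (what is proved, stated in full; the proofs are below) =====
def Claim_equal_group_ans : Prop := ∀ (str1 : String), Dom_group_ans str1 → Spec_group_ans str1 (group_ans str1)

-- ===== LEMMAS AND PROOFS =====

-- ---- decimal-representation injectivity ("Person"+str(i) keys are pairwise distinct) ----

theorem pvDigitChar_toNat : ∀ k, k < 10 → (Nat.digitChar k).toNat = 48 + k := by decide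

theorem pvTdcAcc : ∀ (f n : Nat) (l : List Char), n < f →
    Nat.toDigitsCore 10 f n l = Nat.toDigitsCore 10 f n [] ++ l := by
  intro f
  induction f with
  | zero => intro n l h; omega
  | succ f ih =>
    intro n l h
    simp only [Nat.toDigitsCore]
    by_cases h10 : n / 10 = 0
    · simp [h10]
    · have hge : 10 ≤ n := by
        by_contra hlt
        exact h10 (Nat.div_eq_of_lt (by omega))
      have hlt : n / 10 < f := lt_of_lt_of_le (Nat.div_lt_self (by omega) (by omega)) (by omega)
      simp only [h10]
      rw [ih (n / 10) (Nat.digitChar (n % 10) :: l) hlt,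
          ih (n / 10) [Nat.digitChar (n % 10)] hlt]
      simp

theorem pvTdcFuel : ∀ (f f' n : Nat), n < f → n < f' →
    Nat.toDigitsCore 10 f n [] = Nat.toDigitsCore 10 f' n [] := by
  intro f
  induction f with
  | zero => intro f' n h; omega
  | succ f ih =>
    intro f' n h h'
    cases f' with
    | zero => omega
    | succ f' =>
      simp only [Nat.toDigitsCore]
      by_cases h10 : n / 10 = 0
      · simp [h10]
      · have hge : 10 ≤ n := by
          by_contra hlt
          exact h10 (Nat.div_eq_of_lt (by omega))
        have hlt : n / 10 < f := lt_of_lt_of_le (Nat.div_lt_self (by omega) (by omega)) (by omega)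
        have hlt' : n / 10 < f' := lt_of_lt_of_le (Nat.div_lt_self (by omega) (by omega)) (by omega)
        simp only [h10]
        rw [pvTdcAcc f (n / 10) _ hlt, pvTdcAcc f' (n / 10) _ hlt', ih f' (n / 10) hlt hlt']

def pvVal (l : List Char) : Nat := l.foldl (fun a c => a * 10 + (c.toNat - 48)) 0

theorem pvValToDigits : ∀ n : Nat, pvVal (Nat.toDigits 10 n) = n := by
  intro n
  induction n using Nat.strong_induction_on with
  | _ n ih =>
    show pvVal (Nat.toDigitsCore 10 (n + 1) n []) = n
    by_cases h10 : n / 10 = 0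
    · have hn : n < 10 := by
        by_contra hge
        have := Nat.div_le_div_right (c := 10) (Nat.le_of_not_lt hge)
        simp at this
        omega
      simp only [Nat.toDigitsCore, h10, if_pos]
      have hmod : n % 10 = n := Nat.mod_eq_of_lt hn
      simp [pvVal, hmod, pvDigitChar_toNat n hn]
    · have hge : 10 ≤ n := by
        by_contra hlt
        exact h10 (Nat.div_eq_of_lt (by omega))
      have hlt : n / 10 < n := Nat.div_lt_self (by omega) (by omega)
      have step : Nat.toDigitsCore 10 (n + 1) n [] =
          Nat.toDigits 10 (n / 10) ++ [Nat.digitChar (n % 10)] := by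
        simp only [Nat.toDigitsCore, h10]
        rw [pvTdcAcc n (n / 10) _ (by omega)]
        show Nat.toDigitsCore 10 n (n / 10) [] ++ _ =
          Nat.toDigitsCore 10 (n / 10 + 1) (n / 10) [] ++ _
        rw [pvTdcFuel n (n / 10 + 1) (n / 10) (by omega) (by omega)]
      rw [step]
      have hval : pvVal (Nat.toDigits 10 (n / 10) ++ [Nat.digitChar (n % 10)]) =
          pvVal (Nat.toDigits 10 (n / 10)) * 10 + ((Nat.digitChar (n % 10)).toNat - 48) := by
        simp [pvVal, List.foldl_append]
      rw [hval, ih (n / 10) hlt, pvDigitChar_toNat (n % 10) (Nat.mod_lt n (by omega))]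
      omega

theorem pvPaKeyInj (m k : Nat) (h : paKey (m : Int) = paKey (k : Int)) : m = k := by
  have h1 : ("Person" ++ PySem.Int.toStr (m : Int)).toList =
      ("Person" ++ PySem.Int.toStr (k : Int)).toList := congrArg String.toList h
  simp only [String.toList_append] at h1
  have h2 : (PySem.Int.toStr (m : Int)).toList = (PySem.Int.toStr (k : Int)).toList :=
    List.append_cancel_left h1
  simp only [PySem.Int.toStr, String.toList_ofList] at h2
  have hm : PySem.Int.toChars (m : Int) = Nat.toDigits 10 m := by
    simp [PySem.Int.toChars]
  have hk : PySem.Int.toChars (k : Int) = Nat.toDigits 10 k := by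
    simp [PySem.Int.toChars]
  rw [hm, hk] at h2
  rw [← pvValToDigits m, ← pvValToDigits k, h2]

-- ---- split(",") never returns the empty list ----

theorem pvGoNeNil (sep : List Char) : ∀ (fuel : Nat) (s cur : List Char)
    (acc : List (List Char)), PySem.Chars.splitOn.go sep fuel s cur acc ≠ [] := by
  intro fuel
  induction fuel with
  | zero =>
    intro s cur acc
    simp [PySem.Chars.splitOn.go]
  | succ f ih =>
    intro s cur acc
    cases s with
    | nil => simp [PySem.Chars.splitOn.go]
    | cons c rest =>
      simp only [PySem.Chars.splitOn.go]
      split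
      · exact ih _ _ _
      · exact ih _ _ _

theorem pvSplitNeNil (s : String) :
    ∃ p0 rest, (PySem.Str.split? s ",").getD [] = p0 :: rest := by
  simp only [PySem.Str.split?, PySem.Chars.split?, PySem.Chars.splitOn]
  have hsep : (",".toList.isEmpty) = false := by decide
  rw [hsep]
  simp only [Bool.false_eq_true, ite_false, Option.map_some, Option.getD_some]
  rcases hgo : PySem.Chars.splitOn.go ",".toList (s.toList.length + 1) s.toList [] [] with _ | ⟨x, xs⟩
  · exact absurd hgo (pvGoNeNil _ _ _ _ _)
  · exact ⟨String.ofList x, xs.map String.ofList, by simp⟩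

-- ---- the first loop, one person at a time ----

-- the characters of str_elm[k]
def pvLt (people : List String) (k : Nat) : List Char :=
  ((PySem.List.pyGet? people (k : Int)).getD "").toList

-- the body of A's first loop (Lean-side name for the transliterated lambda)
def pvStep1 (people : List String) :
    PySem.Dict String (PySem.Dict Char Int) → Int → PySem.Dict String (PySem.Dict Char Int) :=
  fun d i =>
    ((PySem.List.pyGet? people i).getD "").toList.foldl (fun d letter =>
      let cur := (d.get? (paKey i)).getD PySem.Dict.empty
      if cur.contains letter = false then
        d.insert (paKey i) (cur.insert letter ((PySem.List.count people (String.singleton letter) : Nat) : Int))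
      else d) (d.insert (paKey i) PySem.Dict.empty)

-- the inner dict a single person ends up with
def pvInner (people : List String) (ls : List Char) : PySem.Dict Char Int :=
  ls.foldl (fun acc letter =>
    if acc.contains letter = false then
      acc.insert letter ((PySem.List.count people (String.singleton letter) : Nat) : Int)
    else acc) PySem.Dict.empty

-- the dict built by A's first loop
def pvAd (people : List String) : PySem.Dict String (PySem.Dict Char Int) :=
  (PySem.List.pyRange 0 (people.length : Int)).foldl (pvStep1 people) PySem.Dict.empty

-- the body of A's second loop
def pvStep2 (A : PySem.Dict String (PySem.Dict Char Int)) : List Char → Int → List Char :=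
  fun ks i => ((A.get? (paKey i)).getD PySem.Dict.empty).keys.foldl (fun ks elm => ks ++ [elm]) ks

-- A's keyCounts list, in closed form
def pvKC (people : List String) : List Char :=
  ((List.range people.length).map (fun k => PySem.Set.ofList (pvLt people k))).flatten

def pvAVal (people : List String) : Int :=
  let K := (PySem.List.pyRange 0 ((pvAd people).keys.length : Int)).foldl (pvStep2 (pvAd people)) []
  let C := K.foldl (fun c x => c.insert x ((PySem.List.count K x : Nat) : Int)) PySem.Dict.empty
  C.keys.foldl (fun y elm =>
    if (people.length : Int) ≤ C.getD elm 0 then y + 1 else y) 0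

def pvBVal (people : List String) : Int :=
  match people with
  | [] => 0
  | p :: rest =>
    ((rest.foldl (fun acc q => PySem.Set.inter acc (PySem.Set.ofList q.toList))
        (PySem.Set.ofList p.toList)).length : Int)

theorem pvAStruct (str1 : String) :
    group_ans str1 = pvAVal ((PySem.Str.split? str1 ",").getD []) := rfl

theorem pvBStruct (str1 : String) :
    group_ans_alt str1 = pvBVal ((PySem.Str.split? str1 ",").getD []) := rfl

-- one letter loop only ever touches its own key
theorem pvLoop1Inner (v : Char → Int) (k : String)
    (d : PySem.Dict String (PySem.Dict Char Int)) :
    ∀ (ls : List Char) (e : PySem.Dict Char Int),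
    ls.foldl (fun d letter =>
        let cur := (d.get? k).getD PySem.Dict.empty
        if cur.contains letter = false then d.insert k (cur.insert letter (v letter)) else d)
      (d.insert k e)
    = d.insert k (ls.foldl (fun acc letter =>
        if acc.contains letter = false then acc.insert letter (v letter) else acc) e) := by
  intro ls
  induction ls with
  | nil => intro e; rfl
  | cons l ls ih =>
    intro e
    simp only [List.foldl_cons, PySem.Dict.get?_insert_self, Option.getD_some]
    by_cases hc : e.contains l = false
    · simp only [hc, if_pos, PySem.Dict.insert_insert_self]
      exact ih (e.insert l (v l))
    · simp only [hc]
      exact ih e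

theorem pvStep1Insert (people : List String) (d : PySem.Dict String (PySem.Dict Char Int))
    (k : Nat) : pvStep1 people d (k : Int) = d.insert (paKey (k : Int)) (pvInner people (pvLt people k)) :=
  pvLoop1Inner _ _ d (pvLt people k) PySem.Dict.empty

theorem pvAdItems (people : List String) :
    (pvAd people).items
      = (List.range people.length).map (fun (k : Nat) => (paKey (k : Int), pvInner people (pvLt people k))) := by
  rw [pvAd, PySem.List.pyRange_zero_natCast, List.foldl_map]
  have hb : (fun (d : PySem.Dict String (PySem.Dict Char Int)) (k : Nat) => pvStep1 people d (k : Int))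
      = (fun d k => d.insert (paKey (k : Int)) (pvInner people (pvLt people k))) := by
    funext d k
    exact pvStep1Insert people d k
  rw [hb]
  rw [PySem.Dict.items_foldl_insert_fresh (List.range people.length)
        (fun (k : Nat) => paKey (k : Int)) (fun (k : Nat) => pvInner people (pvLt people k)) PySem.Dict.empty
        (fun a _ => PySem.Dict.contains_empty _)
        (List.Nodup.map_on (fun x _ y _ h => pvPaKeyInj x y h) (List.nodup_range))]
  rfl

theorem pvAdKeys (people : List String) :
    (pvAd people).keys = (List.range people.length).map (fun (k : Nat) => paKey (k : Int)) := by
  show (pvAd people).items.map Prod.fst = _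
  rw [pvAdItems, List.map_map]
  rfl

theorem pvAdKeysNodup (people : List String) : (pvAd people).keys.Nodup := by
  rw [pvAdKeys]
  exact List.Nodup.map_on (fun x _ y _ h => pvPaKeyInj x y h) (List.nodup_range)

theorem pvAdGet (people : List String) (k : Nat) (hk : k < people.length) :
    (pvAd people).get? (paKey (k : Int)) = some (pvInner people (pvLt people k)) := by
  apply PySem.Dict.get?_of_mem_items _ _ (pvAdKeysNodup people)
  rw [pvAdItems]
  exact List.mem_map.mpr ⟨k, List.mem_range.mpr hk, rfl⟩

-- keys of the inner letter dict = the person's distinct letters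
theorem pvInnerKeysAux (v : Char → Int) :
    ∀ (ls : List Char) (acc : PySem.Dict Char Int),
    (ls.foldl (fun acc letter =>
        if acc.contains letter = false then acc.insert letter (v letter) else acc) acc).keys
    = PySem.Set.update acc.keys ls := by
  intro ls
  induction ls with
  | nil => intro acc; rw [List.foldl_nil, PySem.Set.update_nil]
  | cons l ls ih =>
    intro acc
    rw [List.foldl_cons, PySem.Set.update_cons]
    cases hcl : acc.contains l with
    | false =>
      rw [if_pos rfl, ih, PySem.Dict.keys_insert_of_not_contains _ _ hcl,
          PySem.Set.add_of_not_mem (fun hmem => by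
            rw [← PySem.Dict.contains_iff_mem_keys] at hmem
            rw [hmem] at hcl
            cases hcl)]
    | true =>
      rw [if_neg (by simp), ih,
          PySem.Set.add_of_mem ((PySem.Dict.contains_iff_mem_keys _ _).mp hcl)]

theorem pvInnerKeys (people : List String) (ls : List Char) :
    (pvInner people ls).keys = PySem.Set.ofList ls := by
  rw [pvInner, pvInnerKeysAux, PySem.Dict.keys_empty, PySem.Set.update_nil_left]

-- the second loop produces pvKC
theorem pvKval (people : List String) :
    (PySem.List.pyRange 0 ((pvAd people).keys.length : Int)).foldl (pvStep2 (pvAd people)) []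
      = pvKC people := by
  have hlen : (pvAd people).keys.length = people.length := by
    rw [pvAdKeys, List.length_map, List.length_range]
  rw [hlen, PySem.List.pyRange_zero_natCast, List.foldl_map]
  rw [PySem.List.foldl_congr_mem (List.range people.length)
        (fun ks (k : Nat) => pvStep2 (pvAd people) ks (k : Int))
        (fun ks (k : Nat) => ks ++ PySem.Set.ofList (pvLt people k)) []
        (by
          intro acc k hk
          rw [List.mem_range] at hk
          show pvStep2 (pvAd people) acc (k : Int) = _
          rw [pvStep2, pvAdGet people k hk]
          show (pvInner people (pvLt people k)).keys.foldl (fun ks elm => ks ++ [elm]) acc = _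
          rw [PySem.List.foldl_append_singleton, pvInnerKeys])]
  rw [← List.foldl_map (f := fun (k : Nat) => PySem.Set.ofList (pvLt people k)) (g := fun a x => a ++ x)]
  rw [PySem.List.foldl_append_eq_flatten]
  rfl

-- lookup in a fold of inserts whose values do not depend on the dict
theorem pvGetFoldlInsertConst (g : Char → Int) :
    ∀ (l : List Char) (d : PySem.Dict Char Int) (c : Char),
    (l.foldl (fun d x => d.insert x (g x)) d).get? c
      = if c ∈ l then some (g c) else d.get? c := by
  intro l
  induction l with
  | nil => intro d c; simp
  | cons x xs ih =>
    intro d c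
    rw [List.foldl_cons, ih]
    by_cases hxs : c ∈ xs
    · simp [hxs]
    · by_cases hx : c = x
      · simp [hx, PySem.Dict.get?_insert_self]
      · rw [PySem.Dict.get?_insert]
        simp [hxs, hx]

-- counter + final loop, in closed form
theorem pvFinalCount (K : List Char) (n : Nat) :
    ((K.foldl (fun c x => c.insert x ((PySem.List.count K x : Nat) : Int)) PySem.Dict.empty).keys.foldl
      (fun y elm =>
        if (n : Int) ≤ (K.foldl (fun c x => c.insert x ((PySem.List.count K x : Nat) : Int)) PySem.Dict.empty).getD elm 0
        then y + 1 else y) 0)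
    = (((PySem.Set.ofList K).countP (fun c => decide (n ≤ List.count c K)) : Nat) : Int) := by
  set C := K.foldl (fun c x => c.insert x ((PySem.List.count K x : Nat) : Int)) PySem.Dict.empty with hC
  have hCkeys : C.keys = PySem.Set.ofList K := by
    show (K.foldl (fun c x => c.insert x ((PySem.List.count K x : Nat) : Int)) PySem.Dict.empty).keys = _
    rw [PySem.Dict.keys_foldl_insert K (fun _ x => ((PySem.List.count K x : Nat) : Int)) PySem.Dict.empty,
        PySem.Dict.keys_empty, PySem.Set.update_nil_left]
  have hCget : ∀ c ∈ K, C.getD c 0 = ((List.count c K : Nat) : Int) := by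
    intro c hc
    show (K.foldl (fun c x => c.insert x ((PySem.List.count K x : Nat) : Int)) PySem.Dict.empty).getD c 0 = _
    rw [PySem.Dict.getD_eq_get?_getD, pvGetFoldlInsertConst (fun x => ((PySem.List.count K x : Nat) : Int)) K PySem.Dict.empty c]
    simp [hc]
  have hfun : (fun (y : Int) elm => if (n : Int) ≤ C.getD elm 0 then y + 1 else y)
      = (fun (y : Int) elm => if (fun e => decide ((n : Int) ≤ C.getD e 0)) elm = true then y + 1 else y) := by
    funext y e
    simp
  show C.keys.foldl _ 0 = _
  rw [hfun, PySem.List.foldl_count_if (fun e => decide ((n : Int) ≤ C.getD e 0)) C.keys 0, zero_add,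
      hCkeys]
  congr 1
  apply List.countP_congr
  intro c hc
  rw [PySem.Set.mem_ofList] at hc
  simp only [decide_eq_true_eq]
  rw [hCget c hc]
  exact_mod_cast Iff.rfl

-- B's loop: membership in the running intersection
theorem pvMemFoldlInter :
    ∀ (rest : List String) (s : PySem.Set Char) (c : Char),
    (c ∈ rest.foldl (fun acc q => PySem.Set.inter acc (PySem.Set.ofList q.toList)) s)
      ↔ (c ∈ s ∧ ∀ q ∈ rest, c ∈ q.toList) := by
  intro rest
  induction rest with
  | nil => intro s c; simp
  | cons q qs ih =>
    intro s c
    rw [List.foldl_cons, ih]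
    rw [PySem.Set.mem_inter, PySem.Set.mem_ofList]
    constructor
    · rintro ⟨⟨hs, hq⟩, hqs⟩
      refine ⟨hs, fun r hr => ?_⟩
      rcases List.mem_cons.mp hr with h | h
      · rw [h]; exact hq
      · exact hqs r h
    · rintro ⟨hs, hall⟩
      exact ⟨⟨hs, hall q (by simp)⟩, fun r hr => hall r (by simp [hr])⟩

theorem pvNodupFoldlInter :
    ∀ (rest : List String) (s : PySem.Set Char), s.Nodup →
    (rest.foldl (fun acc q => PySem.Set.inter acc (PySem.Set.ofList q.toList)) s).Nodup := by
  intro rest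
  induction rest with
  | nil => intro s h; exact h
  | cons q qs ih => intro s h; exact ih _ (PySem.Set.nodup_inter _ _ h)

-- counting a char in a flatten of duplicate-free blocks counts the blocks containing it
theorem pvCountFlatten (c : Char) :
    ∀ L : List (List Char), (∀ l ∈ L, l.Nodup) →
    List.count c L.flatten = L.countP (fun l => decide (c ∈ l)) := by
  intro L
  induction L with
  | nil => intro _; simp
  | cons l ls ih =>
    intro h
    rw [List.flatten_cons, List.count_append, List.countP_cons,
        ih (fun x hx => h x (by simp [hx]))]
    by_cases hc : c ∈ l
    · rw [List.count_eq_one_of_mem (h l (by simp)) hc]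
      simp [hc, Nat.add_comm]
    · rw [List.count_eq_zero_of_not_mem hc]
      simp [hc]

-- str_elm[k] for an in-range index
theorem pvLtEq (people : List String) (k : Nat) (hk : k < people.length) :
    pvLt people k = (people[k]'hk).toList := by
  rw [pvLt, PySem.List.pyGet?_natCast, List.getElem?_eq_getElem hk]
  rfl

-- the combinatorial heart: both programs count the letters common to every person
theorem pvCombin (p0 : String) (rest : List String) :
    (((PySem.Set.ofList (pvKC (p0 :: rest))).countP
        (fun c => decide ((p0 :: rest).length ≤ List.count c (pvKC (p0 :: rest)))) : Nat) : Int)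
    = ((rest.foldl (fun acc q => PySem.Set.inter acc (PySem.Set.ofList q.toList))
          (PySem.Set.ofList p0.toList)).length : Int) := by
  set people := p0 :: rest with hpe
  set n := people.length with hn
  have hnpos : 0 < n := by rw [hn, hpe]; simp
  -- every block of pvKC is duplicate-free
  have hblocks : ∀ l ∈ (List.range n).map (fun k => PySem.Set.ofList (pvLt people k)), l.Nodup := by
    intro l hl
    rw [List.mem_map] at hl
    obtain ⟨k, _, rfl⟩ := hl
    exact PySem.Set.nodup_ofList _
  have hcnt : ∀ c, List.count c (pvKC people)
      = (List.range n).countP (fun k => decide (c ∈ pvLt people k)) := by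
    intro c
    rw [pvKC, ← hn, pvCountFlatten c _ hblocks, List.countP_map]
    apply List.countP_congr
    intro k _
    simp [Function.comp, PySem.Set.mem_ofList]
  have hiff : ∀ c, (n ≤ List.count c (pvKC people)) ↔ (∀ k, k < n → c ∈ pvLt people k) := by
    intro c
    rw [hcnt]
    constructor
    · intro hle k hk
      have hlen : (List.range n).countP (fun k => decide (c ∈ pvLt people k)) = (List.range n).length := by
        have := List.countP_le_length (p := fun k => decide (c ∈ pvLt people k)) (l := List.range n)
        rw [List.length_range] at this ⊢
        omega
      have := List.countP_eq_length.mp hlen k (List.mem_range.mpr hk)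
      simpa using this
    · intro hall
      have : (List.range n).countP (fun k => decide (c ∈ pvLt people k)) = (List.range n).length :=
        List.countP_eq_length.mpr (fun k hk => by
          simp only [decide_eq_true_eq]
          exact hall k (List.mem_range.mp hk))
      rw [this, List.length_range]
  -- index form versus "first person and each of the rest"
  have hQ : ∀ c, (∀ k, k < n → c ∈ pvLt people k) ↔ (c ∈ p0.toList ∧ ∀ q ∈ rest, c ∈ q.toList) := by
    intro c
    constructor
    · intro hall
      refine ⟨?_, ?_⟩
      · have h0 := hall 0 hnpos
        rw [pvLtEq people 0 hnpos] at h0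
        simpa [hpe] using h0
      · intro q hq
        obtain ⟨j, hj, hjq⟩ := List.mem_iff_getElem.mp hq
        have hjn : j + 1 < n := by rw [hn, hpe]; simpa using hj
        have h1 := hall (j + 1) hjn
        rw [pvLtEq people (j + 1) hjn] at h1
        rw [← hjq]
        simpa [hpe] using h1
    · rintro ⟨h0, hrest⟩ k hk
      rcases k with _ | j
      · rw [pvLtEq people 0 hk]
        simpa [hpe] using h0
      · have hj : j < rest.length := by
          rw [hn, hpe] at hk
          simpa using hk
        rw [pvLtEq people (j + 1) hk]
        have hpj : people[j + 1]'hk = rest[j]'hj := by simp [hpe]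
        rw [hpj]
        exact hrest _ (List.getElem_mem hj)
  set common := rest.foldl (fun acc q => PySem.Set.inter acc (PySem.Set.ofList q.toList))
      (PySem.Set.ofList p0.toList) with hcommon
  have hmemC : ∀ c, c ∈ common ↔ (c ∈ p0.toList ∧ ∀ q ∈ rest, c ∈ q.toList) := by
    intro c
    rw [hcommon, pvMemFoldlInter rest _ c, PySem.Set.mem_ofList]
  have hnodC : common.Nodup := pvNodupFoldlInter rest _ (PySem.Set.nodup_ofList _)
  -- the full predicate
  set P : Char → Bool := fun c => decide (∀ k, k < n → c ∈ pvLt people k) with hPdef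
  have hPcount : (PySem.Set.ofList (pvKC people)).countP
      (fun c => decide (n ≤ List.count c (pvKC people)))
      = (PySem.Set.ofList (pvKC people)).countP P := by
    apply List.countP_congr
    intro c _
    simp only [hPdef, decide_eq_true_eq]
    exact hiff c
  have hBlen : common.length = (common.filter P).length := by
    rw [List.filter_eq_self.mpr]
    intro c hc
    rw [hPdef, decide_eq_true_eq]
    exact (hQ c).mpr ((hmemC c).mp hc)
  have hAlen : (PySem.Set.ofList (pvKC people)).countP P
      = ((PySem.Set.ofList (pvKC people)).filter P).length := List.countP_eq_length_filter
  have hperm : ((PySem.Set.ofList (pvKC people)).filter P).Perm (common.filter P) := by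
    rw [List.perm_ext_iff_of_nodup (List.Nodup.filter _ (PySem.Set.nodup_ofList _))
          (List.Nodup.filter _ hnodC)]
    intro c
    rw [List.mem_filter, List.mem_filter]
    constructor
    · rintro ⟨_, hP⟩
      refine ⟨?_, hP⟩
      rw [hmemC c]
      apply (hQ c).mp
      rw [hPdef, decide_eq_true_eq] at hP
      exact hP
    · rintro ⟨_, hP⟩
      refine ⟨?_, hP⟩
      rw [hPdef, decide_eq_true_eq] at hP
      have h0 := hP 0 hnpos
      rw [PySem.Set.mem_ofList, pvKC, ← hn, List.mem_flatten]
      exact ⟨PySem.Set.ofList (pvLt people 0),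
        List.mem_map.mpr ⟨0, List.mem_range.mpr hnpos, rfl⟩,
        (PySem.Set.mem_ofList _ _).mpr h0⟩
  rw [hPcount, hAlen, hperm.length_eq, ← hBlen]

theorem group_ans_spec_aux (str1 : String) : group_ans str1 = group_ans_alt str1 := by
  obtain ⟨p0, rest, hP⟩ := pvSplitNeNil str1
  rw [pvAStruct, pvBStruct, hP]
  show pvAVal (p0 :: rest) = pvBVal (p0 :: rest)
  simp only [pvAVal]
  rw [pvKval]
  rw [pvFinalCount (pvKC (p0 :: rest)) (p0 :: rest).length]
  rw [pvCombin p0 rest]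
  rfl

-- ===== VERDICT (by name: the statement is the Claim_ definition above) =====
theorem group_ans_spec : Claim_equal_group_ans := by
  intro str1 _
  unfold Spec_group_ans
  exact group_ans_spec_aux str1
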